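-- pv_equiv track=rewrite | github.com/bryanvillar69/firstproject | SLOT MACHINE.py | horizontal_score_line_three
-- ===== SOURCE A (Python) =====
-- def pattern_count_horizontal(run_length):
--     if run_length == 2:
--         return 2
--     elif run_length == 3:
--         return 3
--     elif run_length == 4:
--         return 5
--     elif run_length == 5:
--         return 10
--     else:
--         return 0
--
-- def horizontal_score_line_three(slot_line_three, h_score):  # horizontal score for line 3
--     run_length = 1
--     patterns_h3 = []
--     h_score_line_three = ""
--     for i in range(len(slot_line_three) - 1):
--         if slot_line_three[i] == slot_line_three[i + 1]:
--             run_length += 1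
--         else:
--             if run_length >= 2:
--                 patterns_h3.append(f"{slot_line_three[i]} x{run_length}")
--             h_score += pattern_count_horizontal(run_length)
--             run_length = 1
--
--     # append last run if >=2
--     if run_length >= 2:
--         patterns_h3.append(f"{slot_line_three[-1]} x{run_length}")
--     h_score += pattern_count_horizontal(run_length)
--
--     if patterns_h3:
--         for pattern in patterns_h3:
--             h_score_line_three += f" {pattern}"
--
--     return h_score, h_score_line_three
-- ===== SOURCE B (Python) =====
-- _SCORES = {2: 2, 3: 3, 4: 5, 5: 10}
--
-- def horizontal_score_line_three(slot_line_three, h_score):  # horizontal score for line 3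
--     n = len(slot_line_three)
--     # staged: run boundaries by comprehension, run extents by zipping starts with next starts
--     starts = [i for i in range(n) if i == 0 or slot_line_three[i] != slot_line_three[i - 1]]
--     line = ""
--     for s, e in zip(starts, starts[1:] + [n]):
--         h_score += _SCORES.get(e - s, 0)
--         if e - s >= 2:
--             line += f" {slot_line_three[s]} x{e - s}"
--     return h_score, line
-- ===== Notes on version B (the rewrite author's own statement) =====
-- stated objective: alternative
-- what changed: Replaces A's single-pass run counter with end-of-loop fix-up and a second rendering pass by a staged formulation: a comprehension collects run-start boundary indices, each run is reconstructed as a (start, next start) pair by zipping the boundary list with its own tail, and scoring/formatting folds over those pairs with a table lookup.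
import Mathlib
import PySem

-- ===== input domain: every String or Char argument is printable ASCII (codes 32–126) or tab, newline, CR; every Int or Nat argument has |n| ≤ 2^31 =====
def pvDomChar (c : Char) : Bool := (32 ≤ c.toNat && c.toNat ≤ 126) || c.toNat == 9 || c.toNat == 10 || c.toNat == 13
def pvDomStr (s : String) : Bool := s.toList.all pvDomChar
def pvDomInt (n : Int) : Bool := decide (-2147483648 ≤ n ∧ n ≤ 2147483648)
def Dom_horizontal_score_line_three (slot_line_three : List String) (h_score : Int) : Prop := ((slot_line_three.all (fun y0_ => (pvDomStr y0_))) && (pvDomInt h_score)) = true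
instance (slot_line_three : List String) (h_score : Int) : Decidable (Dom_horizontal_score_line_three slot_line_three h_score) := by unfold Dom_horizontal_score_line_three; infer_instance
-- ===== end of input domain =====

-- B replaces A's run-counter pass (with final-run fix-up and a second rendering loop) by a staged
-- formulation: a comprehension of run-start boundaries, zipped with its own tail to get run extents,
-- then one fold scoring/formatting each extent; same cost, proved to return the same value.


-- ===== PORT A =====
def pattern_count_horizontal (run_length : Int) : Int :=
  if run_length == 2 then 2
  else if run_length == 3 then 3
  else if run_length == 4 then 5
  else if run_length == 5 then 10
  else 0

def horizontal_score_line_three (slot_line_three : List String) (h_score : Int) : Int × String :=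
  let st :=
    (PySem.List.pyRange 0 ((slot_line_three.length : Int) - 1) 1).foldl
      (fun (s : Int × List String × Int) i =>
        let (run_length, patterns_h3, hs) := s
        if PySem.List.pyGetD slot_line_three i "" == PySem.List.pyGetD slot_line_three (i + 1) "" then
          (run_length + 1, patterns_h3, hs)
        else
          let patterns_h3 :=
            if run_length ≥ 2 then
              patterns_h3 ++ [PySem.List.pyGetD slot_line_three i "" ++ " x" ++ PySem.Int.toStr run_length]
            else patterns_h3
          (1, patterns_h3, hs + pattern_count_horizontal run_length))
      (1, [], h_score)
  let (run_length, patterns_h3, hs) := st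
  let patterns_h3 :=
    if run_length ≥ 2 then
      patterns_h3 ++ [PySem.List.pyGetD slot_line_three (-1) "" ++ " x" ++ PySem.Int.toStr run_length]
    else patterns_h3
  let hs := hs + pattern_count_horizontal run_length
  let line := patterns_h3.foldl (fun acc p => acc ++ " " ++ p) ""
  (hs, line)

-- ===== PORT B =====
def pvScores : PySem.Dict Int Int := PySem.Dict.ofList [(2, 2), (3, 3), (4, 5), (5, 10)]

def horizontal_score_line_three_alt (slot_line_three : List String) (h_score : Int) : Int × String :=
  -- starts = [i for i in range(n) if i == 0 or slot_line_three[i] != slot_line_three[i-1]]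
  let starts := (PySem.List.pyRange 0 (slot_line_three.length : Int) 1).filter
    (fun i => i == 0 || !(PySem.List.pyGetD slot_line_three i "" == PySem.List.pyGetD slot_line_three (i - 1) ""))
  -- for s, e in zip(starts, starts[1:] + [n]): accumulate score and line
  (List.zip starts (starts.drop 1 ++ [(slot_line_three.length : Int)])).foldl
    (fun (acc : Int × String) se =>
      (acc.1 + pvScores.getD (se.2 - se.1) 0,
       if se.2 - se.1 ≥ 2 then
         acc.2 ++ " " ++ PySem.List.pyGetD slot_line_three se.1 "" ++ " x" ++ PySem.Int.toStr (se.2 - se.1)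
       else acc.2))
    (h_score, "")

-- ===== PRECONDITION & SPEC =====
def Spec_horizontal_score_line_three (slot_line_three : List String) (h_score : Int) (out : Int × String) : Prop := out = horizontal_score_line_three_alt slot_line_three h_score
instance (slot_line_three : List String) (h_score : Int) (out : Int × String) : Decidable (Spec_horizontal_score_line_three slot_line_three h_score out) := by unfold Spec_horizontal_score_line_three; infer_instance

-- ===== CLAIM (what is proved, stated in full; the proofs are below) =====
def Claim_equal_horizontal_score_line_three : Prop := ∀ (slot_line_three : List String) (h_score : Int), Dom_horizontal_score_line_three slot_line_three h_score → Spec_horizontal_score_line_three slot_line_three h_score (horizontal_score_line_three slot_line_three h_score)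

-- ===== LEMMAS AND PROOFS =====

theorem score_eq (r : Int) : pattern_count_horizontal r = pvScores.getD r 0 := by
  by_cases h1 : r = 2
  · subst h1; rfl
  by_cases h2 : r = 3
  · subst h2; rfl
  by_cases h3 : r = 4
  · subst h3; rfl
  by_cases h4 : r = 5
  · subst h4; rfl
  have hit : pvScores.items = [(2, 2), (3, 3), (4, 5), (5, 10)] := by rfl
  simp only [pattern_count_horizontal, PySem.Dict.getD, PySem.Dict.get?, hit, List.find?]
  rw [show ((2:Int) == r) = false by simp; omega,
      show ((3:Int) == r) = false by simp; omega,
      show ((4:Int) == r) = false by simp; omega,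
      show ((5:Int) == r) = false by simp; omega,
      show ((r == 2)) = false by simp [h1],
      show ((r == 3)) = false by simp [h2],
      show ((r == 4)) = false by simp [h3],
      show ((r == 5)) = false by simp [h4]]
  rfl

-- run decomposition shared by both proofs
def pvRunsAux (x : String) (r : Int) : List String → List (String × Int)
  | [] => [(x, r)]
  | y :: ys => if y = x then pvRunsAux x (r + 1) ys else (x, r) :: pvRunsAux y 1 ys

def pvRuns : List String → List (String × Int)
  | [] => []
  | y :: ys => pvRunsAux y 1 ys

-- common evaluation of a run list
def pvEval (hs : Int) (line : String) (rs : List (String × Int)) : Int × String :=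
  rs.foldl (fun acc r =>
    (acc.1 + pvScores.getD r.2 0,
     if r.2 ≥ 2 then acc.2 ++ " " ++ r.1 ++ " x" ++ PySem.Int.toStr r.2 else acc.2))
    (hs, line)

theorem pvEval_cons (hs : Int) (line : String) (x : String) (k : Int) (rs : List (String × Int)) :
    pvEval hs line ((x, k) :: rs)
      = pvEval (hs + pvScores.getD k 0)
          (if k ≥ 2 then line ++ " " ++ x ++ " x" ++ PySem.Int.toStr k else line) rs := rfl

theorem pvEval_nil (hs : Int) (line : String) : pvEval hs line [] = (hs, line) := rfl

-- end of the run of xs[i] starting at index j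
def pvRunEnd (xs : List String) (x0 : String) (j : Nat) : Nat :=
  if h : j < xs.length then
    if xs[j] == x0 then pvRunEnd xs x0 (j + 1) else j
  else j
termination_by xs.length - j

theorem pvRunEnd_ge (xs : List String) (x0 : String) (j : Nat) : j ≤ pvRunEnd xs x0 j := by
  unfold pvRunEnd
  split
  · split
    · have := pvRunEnd_ge xs x0 (j + 1); omega
    · omega
  · omega
termination_by xs.length - j

theorem pvRunEnd_le (xs : List String) (x0 : String) (j : Nat) (hj : j ≤ xs.length) :
    pvRunEnd xs x0 j ≤ xs.length := by
  unfold pvRunEnd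
  split
  · split
    · exact pvRunEnd_le xs x0 (j + 1) (by omega)
    · omega
  · omega
termination_by xs.length - j

theorem pvGetD_idx (xs : List String) (k : Nat) (hk : k < xs.length) :
    PySem.List.pyGetD xs (k : Int) "" = xs[k] := by
  rw [PySem.List.pyGetD_natCast, List.getD_eq_getElem _ _ hk]

theorem render_append (pats : List String) (p s : String) :
    (pats ++ [p]).foldl (fun acc q => acc ++ " " ++ q) s
      = pats.foldl (fun acc q => acc ++ " " ++ q) s ++ " " ++ p := by
  rw [List.foldl_append]; rfl

-- runsAux on the suffix from i+1 splits off the run ending at pvRunEnd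
theorem runsAux_decomp (xs : List String) (i : Nat) (hi : i < xs.length) (r : Int) :
    pvRunsAux xs[i] r (xs.drop (i + 1))
      = (xs[i], r + ((pvRunEnd xs xs[i] (i + 1) : Int) - ((i : Int) + 1)))
        :: pvRuns (xs.drop (pvRunEnd xs xs[i] (i + 1))) := by
  by_cases hl : i + 1 < xs.length
  · rw [List.drop_eq_getElem_cons hl]
    by_cases heq : xs[i + 1] = xs[i]
    · rw [pvRunsAux, if_pos heq]
      have hre : pvRunEnd xs xs[i] (i + 1) = pvRunEnd xs xs[i + 1] (i + 1 + 1) := by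
        rw [pvRunEnd, dif_pos hl, if_pos (by simp [heq]), heq]
      rw [show pvRunsAux xs[i] (r + 1) (xs.drop (i + 1 + 1))
            = pvRunsAux xs[i + 1] (r + 1) (xs.drop ((i + 1) + 1)) by rw [heq]]
      rw [runsAux_decomp xs (i + 1) hl (r + 1), hre, heq]
      congr 2
      push_cast; ring
    · rw [pvRunsAux, if_neg heq]
      have hre : pvRunEnd xs xs[i] (i + 1) = i + 1 := by
        rw [pvRunEnd, dif_pos hl, if_neg (by simp [heq])]
      rw [hre]
      have : pvRuns (xs.drop (i + 1)) = pvRunsAux xs[i + 1] 1 (xs.drop (i + 1 + 1)) := by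
        rw [List.drop_eq_getElem_cons hl, pvRuns]
      rw [this]
      congr 2
      push_cast; ring
  · have hdrop : xs.drop (i + 1) = [] := List.drop_eq_nil_of_le (by omega)
    have hre : pvRunEnd xs xs[i] (i + 1) = i + 1 := by
      rw [pvRunEnd, dif_neg (by omega)]
    rw [hdrop, hre, pvRunsAux]
    have : xs.drop (i + 1) = [] := hdrop
    rw [this, pvRuns]
    congr 2
    push_cast; ring
termination_by xs.length - i

-- A's loop from index i with state (r, pats, hs) evaluates the runs of the suffix
theorem main_lemma_A (xs : List String) (i : Nat) (hi : i < xs.length) (r hs : Int) (pats : List String) :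
    (let st := (PySem.List.pyRange (i : Int) ((xs.length : Int) - 1) 1).foldl
      (fun (s : Int × List String × Int) k =>
        let (run_length, patterns_h3, h) := s
        if PySem.List.pyGetD xs k "" == PySem.List.pyGetD xs (k + 1) "" then
          (run_length + 1, patterns_h3, h)
        else
          let patterns_h3 :=
            if run_length ≥ 2 then
              patterns_h3 ++ [PySem.List.pyGetD xs k "" ++ " x" ++ PySem.Int.toStr run_length]
            else patterns_h3
          (1, patterns_h3, h + pattern_count_horizontal run_length))
      (r, pats, hs)
     let (run_length, patterns_h3, h) := st
     let patterns_h3 :=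
       if run_length ≥ 2 then
         patterns_h3 ++ [PySem.List.pyGetD xs (-1) "" ++ " x" ++ PySem.Int.toStr run_length]
       else patterns_h3
     (h + pattern_count_horizontal run_length,
      patterns_h3.foldl (fun acc p => acc ++ " " ++ p) ""))
    = pvEval hs (pats.foldl (fun acc p => acc ++ " " ++ p) "") (pvRunsAux xs[i] r (xs.drop (i + 1))) := by
  by_cases hlast : i + 1 < xs.length
  · rw [PySem.List.pyRange_one_cons (show (i : Int) < (xs.length : Int) - 1 by omega)]
    simp only [List.foldl]
    rw [show ((i : Int) + 1) = ((i + 1 : Nat) : Int) by push_cast; ring]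
    rw [pvGetD_idx xs i (by omega), pvGetD_idx xs (i + 1) hlast]
    rw [List.drop_eq_getElem_cons hlast, pvRunsAux]
    by_cases heq : xs[i + 1] = xs[i]
    · rw [if_pos (by simp [heq.symm]), if_pos heq]
      rw [show pvRunsAux xs[i] (r + 1) (xs.drop (i + 1 + 1))
            = pvRunsAux xs[i + 1] (r + 1) (xs.drop ((i + 1) + 1)) by rw [heq]]
      exact main_lemma_A xs (i + 1) hlast (r + 1) hs pats
    · rw [if_neg (by simp; intro h; exact heq h.symm), if_neg heq]
      rw [pvEval_cons, ← score_eq]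
      have hline : (if r ≥ 2 then
            (pats.foldl (fun acc p => acc ++ " " ++ p) "") ++ " " ++ xs[i] ++ " x" ++ PySem.Int.toStr r
          else pats.foldl (fun acc p => acc ++ " " ++ p) "")
          = (if r ≥ 2 then pats ++ [xs[i] ++ " x" ++ PySem.Int.toStr r] else pats).foldl
              (fun acc p => acc ++ " " ++ p) "" := by
        split
        · rw [render_append]; simp [String.append_assoc]
        · rfl
      rw [hline]
      exact main_lemma_A xs (i + 1) hlast 1 (hs + pattern_count_horizontal r) _
  · have hiN : i + 1 = xs.length := by omega
    rw [PySem.List.pyRange_one_eq_nil (by omega)]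
    simp only [List.foldl]
    have hdrop : xs.drop (i + 1) = [] := List.drop_eq_nil_of_le (by omega)
    rw [hdrop, pvRunsAux, pvEval_cons, pvEval_nil, ← score_eq]
    have hne : xs ≠ [] := by intro h; subst h; simp at hi
    have hget : PySem.List.pyGetD xs (-1) "" = xs[i] := by
      rw [PySem.List.pyGetD_neg_one xs "" hne, List.getLast_eq_getElem]
      congr 1
      omega
    rw [hget]
    have hline : (if r ≥ 2 then
            (pats.foldl (fun acc p => acc ++ " " ++ p) "") ++ " " ++ xs[i] ++ " x" ++ PySem.Int.toStr r
          else pats.foldl (fun acc p => acc ++ " " ++ p) "")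
          = (if r ≥ 2 then pats ++ [xs[i] ++ " x" ++ PySem.Int.toStr r] else pats).foldl
              (fun acc p => acc ++ " " ++ p) "" := by
      split
      · rw [render_append]; simp [String.append_assoc]
      · rfl
    rw [← hline]
termination_by xs.length - i

-- the starts filter from i+1 begins at the end of the current run
theorem starts_filter (xs : List String) (i : Nat) (hi : i < xs.length) :
    (PySem.List.pyRange ((i : Int) + 1) (xs.length : Int) 1).filter
        (fun k => k == 0 || !(PySem.List.pyGetD xs k "" == PySem.List.pyGetD xs (k - 1) ""))
      = (if h : pvRunEnd xs xs[i] (i + 1) < xs.length then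
          ((pvRunEnd xs xs[i] (i + 1) : Nat) : Int)
            :: (PySem.List.pyRange ((pvRunEnd xs xs[i] (i + 1) : Int) + 1) (xs.length : Int) 1).filter
                (fun k => k == 0 || !(PySem.List.pyGetD xs k "" == PySem.List.pyGetD xs (k - 1) ""))
         else []) := by
  by_cases hl : i + 1 < xs.length
  · rw [PySem.List.pyRange_one_cons (show (i : Int) + 1 < (xs.length : Int) by omega)]
    rw [List.filter_cons]
    rw [show ((i : Int) + 1) = ((i + 1 : Nat) : Int) by push_cast; ring]
    rw [show ((i + 1 : Nat) : Int) - 1 = (i : Int) by push_cast; ring]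
    rw [pvGetD_idx xs i (by omega), pvGetD_idx xs (i + 1) hl]
    by_cases heq : xs[i + 1] = xs[i]
    · rw [if_neg (by simp [heq]; omega)]
      have hre : pvRunEnd xs xs[i] (i + 1) = pvRunEnd xs xs[i + 1] (i + 1 + 1) := by
        rw [pvRunEnd, dif_pos hl, if_pos (by simp [heq]), heq]
      rw [hre]
      have := starts_filter xs (i + 1) hl
      rw [show (((i + 1 : Nat) : Int) + 1) = ((i : Int) + 1 + 1) by push_cast; ring] at this
      exact this
    · rw [if_pos (by simp [heq])]
      have hre : pvRunEnd xs xs[i] (i + 1) = i + 1 := by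
        rw [pvRunEnd, dif_pos hl, if_neg (by simp [heq])]
      rw [hre, dif_pos (by omega)]
  · have hre : pvRunEnd xs xs[i] (i + 1) = i + 1 := by
      rw [pvRunEnd, dif_neg (by omega)]
    rw [hre, dif_neg (by omega)]
    rw [PySem.List.pyRange_one_eq_nil (by omega)]
    rfl
termination_by xs.length - i

-- B's zip-fold from run start i evaluates the runs of the suffix from i
theorem main_lemma_B (xs : List String) (i : Nat) (hi : i < xs.length) (hs : Int) (line : String) :
    (List.zip
        ((i : Int) :: (PySem.List.pyRange ((i : Int) + 1) (xs.length : Int) 1).filter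
            (fun k => k == 0 || !(PySem.List.pyGetD xs k "" == PySem.List.pyGetD xs (k - 1) "")))
        (((PySem.List.pyRange ((i : Int) + 1) (xs.length : Int) 1).filter
            (fun k => k == 0 || !(PySem.List.pyGetD xs k "" == PySem.List.pyGetD xs (k - 1) "")))
          ++ [(xs.length : Int)])).foldl
      (fun (acc : Int × String) se =>
        (acc.1 + pvScores.getD (se.2 - se.1) 0,
         if se.2 - se.1 ≥ 2 then
           acc.2 ++ " " ++ PySem.List.pyGetD xs se.1 "" ++ " x" ++ PySem.Int.toStr (se.2 - se.1)
         else acc.2))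
      (hs, line)
    = pvEval hs line (pvRunsAux xs[i] 1 (xs.drop (i + 1))) := by
  rw [starts_filter xs i hi, runsAux_decomp xs i hi 1]
  have hj := pvRunEnd_ge xs xs[i] (i + 1)
  set j := pvRunEnd xs xs[i] (i + 1) with hjdef
  have hlen : 1 + ((j : Int) - ((i : Int) + 1)) = (j : Int) - (i : Int) := by ring
  rw [hlen]
  by_cases hl : j < xs.length
  · rw [dif_pos hl]
    have hrw : pvRuns (xs.drop j) = pvRunsAux xs[j] 1 (xs.drop (j + 1)) := by
      rw [List.drop_eq_getElem_cons hl, pvRuns]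
    rw [pvEval_cons, hrw]
    have hg : xs[i] = PySem.List.pyGetD xs (i : Int) "" := (pvGetD_idx xs i (by omega)).symm
    rw [hg]
    exact main_lemma_B xs j hl
      (hs + pvScores.getD ((j : Int) - (i : Int)) 0)
      (if (j : Int) - (i : Int) ≥ 2 then
        line ++ " " ++ PySem.List.pyGetD xs (i : Int) "" ++ " x"
          ++ PySem.Int.toStr ((j : Int) - (i : Int))
       else line)
  · rw [dif_neg hl]
    have hjle : j ≤ xs.length := pvRunEnd_le xs xs[i] (i + 1) (by omega)
    have hjN : j = xs.length := by omega
    have hdrop : xs.drop j = [] := by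
      rw [hjN]; exact List.drop_length
    rw [hdrop, pvRuns, pvEval_cons, pvEval_nil]
    have hg : xs[i] = PySem.List.pyGetD xs (i : Int) "" := (pvGetD_idx xs i (by omega)).symm
    rw [hg, hjN]
    rfl
termination_by xs.length - i

-- ===== VERDICT (by name: the statement is the Claim_ definition above) =====
theorem horizontal_score_line_three_spec : Claim_equal_horizontal_score_line_three := by
  intro xs h _
  unfold Spec_horizontal_score_line_three
  by_cases hx : xs = []
  · subst hx
    simp [horizontal_score_line_three, horizontal_score_line_three_alt,
      pattern_count_horizontal, PySem.List.pyRange]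
  · have hi : 0 < xs.length := List.length_pos_iff.mpr hx
    have hA := main_lemma_A xs 0 hi 1 h []
    have hB := main_lemma_B xs 0 hi h ""
    simp only [Nat.cast_zero] at hA hB
    have hA2 : horizontal_score_line_three xs h
        = pvEval h "" (pvRunsAux (xs[0]'hi) 1 (xs.drop 1)) := hA
    have hstarts : (PySem.List.pyRange 0 (xs.length : Int) 1).filter
        (fun k => k == 0 || !(PySem.List.pyGetD xs k "" == PySem.List.pyGetD xs (k - 1) ""))
        = (0 : Int) :: (PySem.List.pyRange ((0 : Int) + 1) (xs.length : Int) 1).filter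
            (fun k => k == 0 || !(PySem.List.pyGetD xs k "" == PySem.List.pyGetD xs (k - 1) "")) := by
      rw [PySem.List.pyRange_one_cons (show (0 : Int) < (xs.length : Int) by omega)]
      rw [List.filter_cons, if_pos (by simp)]
    have hB2 : horizontal_score_line_three_alt xs h
        = pvEval h "" (pvRunsAux (xs[0]'hi) 1 (xs.drop 1)) := by
      unfold horizontal_score_line_three_alt
      rw [hstarts]
      exact hB
    exact hA2.trans hB2.symm
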